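-- pv_equiv track=rewrite | github.com/ayoubc/competitive-programming | online_judges/kattis/iks.py | solve
-- ===== SOURCE A (Python) =====
-- def factorization(n: int) -> dict:
--     i = 2
--     res = dict()
--     while i * i <= n:
--         while n % i == 0:
--             res[i] = res.get(i, 0) + 1
--             n //= i
--         i += 1
--     if n > 1:
--         res[n] = res.get(n, 0) + 1
--     return res
--
-- def solve(n, a):
--     prime_fact = [dict() for i in range(n)]
--
--     total = dict()
--     for i in range(n):
--         prime_fact[i] = factorization(a[i])
--         for prime in prime_fact[i]:
--             if prime not in total:
--                 total[prime] = []
--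
--     for prime in total:
--         for i in range(n):
--             total[prime].append(prime_fact[i].get(prime, 0))
--
--     times = 0
--     for prime in total:
--         cnt = 0
--         tmp = min(total[prime])
--         while True:
--             total[prime].sort()
--             if tmp != total[prime][0]:
--                 tmp = total[prime][0]
--                 times += cnt
--                 cnt = 0
--             if total[prime][-1] - total[prime][0] >= 2:
--                 cnt += 1
--                 total[prime][0] += 1
--                 total[prime][-1] -= 1
--             else:
--                 break
--
--     ans = 1
--     for prime in total:
--         ans *= prime ** total[prime][0]
--
--     return ans, times
-- ===== SOURCE B (Python) =====
-- def factorization(m):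
--     d = 2
--     res = {}
--     while d * d <= m:
--         while m % d == 0:
--             res[d] = res.get(d, 0) + 1
--             m //= d
--         d += 1
--     if m > 1:
--         res[m] = res.get(m, 0) + 1
--     return res
--
-- def solve(n, a):
--     # Per prime p with total exponent S over the n numbers, the balanced minimum
--     # exponent is S // n; A's move counter adds, per prime, the number of single-
--     # exponent raises needed to bring every exponent up to that floor.  Both are
--     # computed directly, with no balancing simulation and no sorting.
--     facts = [factorization(a[i]) for i in range(n)]
--     primes = {}
--     for f in facts:
--         for p in f:
--             primes[p] = True
--     ans, times = 1, 0
--     for p in primes: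
--         exps = [f.get(p, 0) for f in facts]
--         q = sum(exps) // n
--         ans *= p ** q
--         times += sum(q - e for e in exps if e < q)
--     return ans, times
-- ===== Notes on version B (the rewrite author's own statement) =====
-- stated objective: alternative
-- what changed: Per prime, B computes the final exponent S//n and the move count sum(max(0, S//n - e)) in closed form in one pass, replacing A's move-by-move balancing simulation that re-sorts the exponent list on every single move; the trial-division factorization both need is unchanged and dominates on typical inputs, so no speed is claimed.
import Mathlib
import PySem

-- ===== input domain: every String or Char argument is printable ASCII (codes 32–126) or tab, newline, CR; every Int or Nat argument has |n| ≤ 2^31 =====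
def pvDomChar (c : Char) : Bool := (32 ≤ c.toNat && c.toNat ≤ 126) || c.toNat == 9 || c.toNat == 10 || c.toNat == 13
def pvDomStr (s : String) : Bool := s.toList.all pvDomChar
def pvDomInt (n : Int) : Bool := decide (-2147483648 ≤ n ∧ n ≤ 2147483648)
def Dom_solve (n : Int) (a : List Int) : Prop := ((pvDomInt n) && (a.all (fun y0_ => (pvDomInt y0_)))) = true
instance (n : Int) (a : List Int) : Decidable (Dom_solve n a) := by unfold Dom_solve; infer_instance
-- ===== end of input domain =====

-- B replaces A's per-prime move-by-move balancing simulation (which re-sorts the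
-- exponent list on every single move) by a closed-form per-prime computation.

-- ===== PORT A =====
-- inner 'while n % i == 0': divides i out of m, counting into res.
-- Fuel m.toNat + 1 bounds the iterations (each pass replaces a positive m by m // i < m,
-- i ≥ 2); the loop always exits by its Python guard before the fuel runs out.
def factDivOut : Nat → Int → Int → PySem.Dict Int Int → Int × PySem.Dict Int Int
  | 0, _, m, res => (m, res)
  | f + 1, i, m, res =>
    if PySem.Int.mod m i = 0 then
      factDivOut f i (PySem.Int.floordiv m i) (res.modify i 0 (· + 1))
    else (m, res)

-- outer 'while i * i <= n' of pyFactorization.  Fuel m.toNat + 1 bounds the iterations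
-- (the guard needs i * i ≤ current m ≤ m, and i grows by 1 from 2); the loop always
-- exits by its Python guard before the fuel runs out.
def factLoop : Nat → Int → Int → PySem.Dict Int Int → Int × PySem.Dict Int Int
  | 0, _, m, res => (m, res)
  | f + 1, i, m, res =>
    if i * i ≤ m then
      let r := factDivOut (m.toNat + 1) i m res
      factLoop f (i + 1) r.1 r.2
    else (m, res)

def pyFactorization (m : Int) : PySem.Dict Int Int :=
  let r := factLoop (m.toNat + 1) 2 m PySem.Dict.empty
  if r.1 > 1 then r.2.modify r.1 0 (· + 1) else r.2

-- fuel for the balancing 'while True' loop: an upper bound on its number of iterations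
-- (proved in loopA_fuel below); the loop always exits by its Python 'break' first.
def fuelA (l : List Int) : Nat := 2 * ((l.map Int.natAbs).sum + 1) * (l.length + 1)

-- the 'while True:' balancing loop of A, for one prime; state (list, tmp, cnt, times).
-- Returns the list as left behind by the loop together with times.
def loopA : Nat → List Int → Int → Int → Int → List Int × Int
  | 0, l, _, _, times => (l, times)  -- fuel exhausted (never reached, see loopA_fuel)
  | f + 1, l, tmp, cnt, times =>
    let ys := PySem.List.sorted l (fun x => x)          -- total[prime].sort()
    let h := PySem.List.pyGetD ys 0 0                   -- total[prime][0]  (list provably nonempty)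
    let tmp' := if tmp ≠ h then h else tmp
    let cnt' := if tmp ≠ h then 0 else cnt
    let times' := if tmp ≠ h then times + cnt else times
    let L := PySem.List.pyGetD ys (-1) 0                -- total[prime][-1]
    if L - h ≥ 2 then
      loopA f (PySem.List.pySetD (PySem.List.pySetD ys 0 (h + 1)) (-1) (L - 1)) tmp' (cnt' + 1) times'
    else (ys, times')

def solve (n : Int) (a : List Int) : Int × Int :=
  -- 'prime_fact = [dict() …]; for i in range(n): prime_fact[i] = pyFactorization(a[i]); for prime in prime_fact[i]: …'
  let r0 := (PySem.List.pyRange 0 n).foldl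
      (fun (s : List (PySem.Dict Int Int) × PySem.Dict Int (List Int)) i =>
        let f := pyFactorization (PySem.List.pyGetD a i 0)
        (s.1 ++ [f],
         f.keys.foldl (fun t p => if t.contains p then t else t.insert p ([] : List Int)) s.2))
      ([], PySem.Dict.empty)
  let facts := r0.1
  let total0 := r0.2
  -- 'for prime in total: for i in range(n): total[prime].append(prime_fact[i].get(prime, 0))'
  let total1 := total0.keys.foldl
      (fun tot p => (PySem.List.pyRange 0 n).foldl
          (fun t i => t.modify p [] (· ++ [(PySem.List.pyGetD facts i PySem.Dict.empty).getD p 0])) tot)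
      total0
  -- 'times = 0; for prime in total: cnt = 0; tmp = min(total[prime]); while True: …'
  let r1 := total1.keys.foldl
      (fun (s : PySem.Dict Int (List Int) × Int) p =>
        let l := s.1.getD p []
        let tmp := (PySem.List.min? l (fun x => x)).getD 0   -- min(total[prime]); list provably nonempty
        let r := loopA (fuelA l) l tmp 0 s.2
        (s.1.insert p r.1, r.2))
      (total1, 0)
  let total2 := r1.1
  let times := r1.2
  -- 'ans = 1; for prime in total: ans *= prime ** total[prime][0]'  (exponent provably ≥ 0)
  let ans := total2.keys.foldl
      (fun ans p => ans * p ^ (PySem.List.pyGetD (total2.getD p []) 0 0).toNat) 1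
  (ans, times)

-- ===== PORT B =====
def solve_alt (n : Int) (a : List Int) : Int × Int :=
  let facts := (PySem.List.pyRange 0 n).map (fun i => pyFactorization (PySem.List.pyGetD a i 0))
  let primes := facts.foldl
      (fun pr f => f.keys.foldl (fun pr p => pr.insert p true) pr)
      (PySem.Dict.empty : PySem.Dict Int Bool)
  let r := primes.keys.foldl
      (fun (acc : Int × Int) p =>
        let exps := facts.map (fun f => f.getD p 0)
        let q := PySem.Int.floordiv exps.sum n
        (acc.1 * p ^ q.toNat,                            -- ans *= p ** q  (q provably ≥ 0)
         acc.2 + ((exps.filter (fun e => decide (e < q))).map (fun e => q - e)).sum))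
      (1, 0)
  r

-- ===== PRECONDITION & SPEC =====
-- Pre_ excludes exactly the inputs on which A raises: for n > len(a) the read a[i]
-- raises IndexError.  (Any n ≤ len(a), including negative n, returns normally.)
def Pre_solve (n : Int) (a : List Int) : Prop := n ≤ (a.length : Int)
instance (n : Int) (a : List Int) : Decidable (Pre_solve n a) := by unfold Pre_solve; infer_instance

def pvWitness_solve : Int × List Int := (3, [4, 6, 8])

def Spec_solve (n : Int) (a : List Int) (out : Int × Int) : Prop := out = solve_alt n a
instance (n : Int) (a : List Int) (out : Int × Int) : Decidable (Spec_solve n a out) := by unfold Spec_solve; infer_instance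

-- ===== CLAIM (what is proved, stated in full; the proofs are below) =====
def Claim_equal_solve : Prop := ∀ (n : Int) (a : List Int), Dom_solve n a → Pre_solve n a → Spec_solve n a (solve n a)

-- ===== LEMMAS AND PROOFS =====

-- per-prime closed-form quantities (proof-side only)
def qv (l : List Int) : Int := PySem.Int.floordiv l.sum (l.length : Int)
def devQ (q : Int) (l : List Int) : Int := (l.map (fun e => max 0 (q - e))).sum
def phiQ (q : Int) (l : List Int) : Nat := (l.map (fun e => (q - e).toNat + (e - (q + 1)).toNat)).sum
def minL (l : List Int) : Int := (PySem.List.sorted l (fun x => x)).headD 0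

lemma sum_le_mul_length (l : List Int) (c : Int) (h : ∀ x ∈ l, x ≤ c) :
    l.sum ≤ c * l.length := by
  have := List.sum_le_card_nsmul l c h
  simpa [nsmul_eq_mul, mul_comm] using this

lemma mul_length_le_sum (l : List Int) (c : Int) (h : ∀ x ∈ l, c ≤ x) :
    c * l.length ≤ l.sum := by
  have := List.card_nsmul_le_sum l c h
  simpa [nsmul_eq_mul, mul_comm] using this

-- min of the elements is at most the floored average
lemma le_qv (l : List Int) (hne : l ≠ []) (c : Int) (hc : ∀ x ∈ l, c ≤ x) : c ≤ qv l := by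
  have hlen : (0 : Int) < l.length := by
    have := List.length_pos_iff.mpr hne; exact_mod_cast this
  rw [qv, PySem.Int.le_floordiv_iff_mul_le hlen]
  exact mul_length_le_sum l c hc

lemma qv_mul_le (l : List Int) (hne : l ≠ []) : qv l * l.length ≤ l.sum := by
  have hlen : (0 : Int) < l.length := by
    have := List.length_pos_iff.mpr hne; exact_mod_cast this
  exact (PySem.Int.le_floordiv_iff_mul_le hlen).mp le_rfl

lemma devQ_eq_zero (q : Int) (l : List Int) (h : ∀ x ∈ l, q ≤ x) : devQ q l = 0 := by
  rw [devQ]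
  apply List.sum_eq_zero
  intro x hx
  simp only [List.mem_map] at hx
  obtain ⟨e, he, rfl⟩ := hx
  have := h e he
  omega

-- B's filtered sum is the closed-form deficit
lemma filter_sum_eq_devQ (q : Int) (l : List Int) :
    ((l.filter (fun e => decide (e < q))).map (fun e => q - e)).sum = devQ q l := by
  induction l with
  | nil => simp [devQ]
  | cons e t ih =>
    by_cases h : e < q <;>
      simp_all [devQ, max_def] <;> omega

lemma natAbs_sum_le (l : List Int) : l.sum.natAbs ≤ (l.map Int.natAbs).sum := by
  induction l with
  | nil => simp
  | cons e t ih =>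
    simp only [List.sum_cons, List.map_cons]
    calc (e + t.sum).natAbs ≤ e.natAbs + t.sum.natAbs := Int.natAbs_add_le _ _
    _ ≤ e.natAbs + (t.map Int.natAbs).sum := by omega

lemma natAbs_qv_le (l : List Int) (hne : l ≠ []) : (qv l).natAbs ≤ (l.map Int.natAbs).sum := by
  have hlen : (0 : Int) < l.length := by
    have := List.length_pos_iff.mpr hne; exact_mod_cast this
  have key : (qv l).natAbs ≤ l.sum.natAbs := by
    have heq := PySem.Int.floordiv_mul_add_mod l.sum (l.length : Int)
    have hr0 : 0 ≤ PySem.Int.mod l.sum (l.length : Int) := PySem.Int.mod_nonneg _ hlen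
    have hrL : PySem.Int.mod l.sum (l.length : Int) < (l.length : Int) := PySem.Int.mod_lt _ hlen
    set q : Int := PySem.Int.floordiv l.sum (l.length : Int) with hq
    by_cases hq0 : 0 ≤ q
    · have h1 : q ≤ q * (l.length : Int) := le_mul_of_one_le_right hq0 (by omega)
      show q.natAbs ≤ _
      omega
    · have h3 : q * (l.length : Int) + (l.length : Int) ≤ q + 1 := by nlinarith
      show q.natAbs ≤ _
      omega
  calc (qv l).natAbs ≤ l.sum.natAbs := key
  _ ≤ _ := natAbs_sum_le l

lemma phiQ_bound (l : List Int) (q : Int) (A : Nat) (hA : q.natAbs ≤ A) :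
    phiQ q l ≤ 2 * A * l.length + 2 * (l.map Int.natAbs).sum := by
  induction l with
  | nil => simp [phiQ]
  | cons e tl ih =>
    have h1 : (q - e).toNat + (e - (q + 1)).toNat ≤ 2 * A + 2 * e.natAbs := by omega
    rw [phiQ] at ih ⊢
    simp only [List.map_cons, List.sum_cons, List.length_cons]
    have hr : 2 * A * (tl.length + 1) = 2 * A * tl.length + 2 * A := by ring
    omega

lemma loopA_fuel (l : List Int) (hne : l ≠ []) : phiQ (qv l) l < fuelA l := by
  have h1 := phiQ_bound l (qv l) ((l.map Int.natAbs).sum) (natAbs_qv_le l hne)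
  rw [fuelA]
  nlinarith [l.length.zero_le, ((l.map Int.natAbs).sum).zero_le]

lemma set_last_eq (xs : List Int) (v : Int) (h : xs ≠ []) :
    xs.set (xs.length - 1) v = xs.dropLast ++ [v] := by
  induction xs with
  | nil => simp at h
  | cons x t ih =>
    cases t with
    | nil => simp
    | cons y u =>
      have h2 := ih (by simp)
      simp only [List.length_cons] at h2 ⊢
      simp only [List.dropLast_cons₂, List.cons_append]
      rw [show u.length + 1 + 1 - 1 = (u.length + 1 - 1) + 1 by omega, List.set_cons_succ, h2]

lemma pySetD_neg_one (xs : List Int) (v : Int) (h : xs ≠ []) :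
    PySem.List.pySetD xs (-1) v = xs.dropLast ++ [v] := by
  have hl : 0 < xs.length := List.length_pos_iff.mpr h
  rw [PySem.List.pySetD, PySem.List.pySet?, PySem.List.pyIdx?]
  have h1 : ¬ (0:Int) ≤ -1 := by omega
  have h2 : -(xs.length:Int) ≤ -1 := by omega
  simp only [if_neg h1, if_pos h2]
  simp only [Option.map_some, Option.getD_some]
  norm_num
  rw [set_last_eq xs v h]

lemma le_getLast_of_pairwise (ys : List Int) (hne : ys ≠ []) (hp : ys.Pairwise (· ≤ ·)) :
    ∀ y ∈ ys, y ≤ ys.getLast hne := by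
  induction ys with
  | nil => simp at hne
  | cons x t ih =>
    intro y hy
    rcases List.mem_cons.mp hy with rfl | hyt
    · cases t with
      | nil => simp
      | cons z u =>
        have hx : ∀ w ∈ z :: u, y ≤ w := (List.pairwise_cons.mp hp).1
        rw [List.getLast_cons (by simp)]
        exact hx _ (List.getLast_mem _)
    · have ht : t ≠ [] := by rintro rfl; simp at hyt
      rw [List.getLast_cons ht]
      exact ih ht (List.pairwise_cons.mp hp).2 y hyt

lemma qv_perm {l l' : List Int} (h : l.Perm l') : qv l = qv l' := by
  rw [qv, qv, h.sum_eq, h.length_eq]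

lemma devQ_perm (q : Int) {l l' : List Int} (h : l.Perm l') : devQ q l = devQ q l' := by
  rw [devQ, devQ, (h.map _).sum_eq]

lemma phiQ_perm (q : Int) {l l' : List Int} (h : l.Perm l') : phiQ q l = phiQ q l' := by
  rw [phiQ, phiQ, (h.map _).sum_eq]

-- the one balancing move, on the decomposed sorted list
lemma move_dev (q h0 tl : Int) (md : List Int) (hh : h0 ≤ q) (h2 : h0 + 2 ≤ tl)
    (hcase : h0 < q → q + 1 ≤ tl) :
    devQ q ((h0 + 1) :: (md ++ [tl - 1])) =
      devQ q (h0 :: (md ++ [tl])) - (if h0 < q then 1 else 0) := by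
  simp only [devQ, List.map_cons, List.map_append, List.sum_cons, List.sum_append,
    List.map_cons, List.sum_cons, List.map_nil, List.sum_nil]
  by_cases hlt : h0 < q
  · have := hcase hlt
    simp only [if_pos hlt]
    omega
  · simp only [if_neg hlt]
    omega

lemma move_phi (q h0 tl : Int) (md : List Int) (hh : h0 ≤ q) (h2 : h0 + 2 ≤ tl)
    (hcase : h0 < q → q + 1 ≤ tl) :
    phiQ q ((h0 + 1) :: (md ++ [tl - 1])) < phiQ q (h0 :: (md ++ [tl])) := by
  simp only [phiQ, List.map_cons, List.map_append, List.sum_cons, List.sum_append,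
    List.map_nil, List.sum_nil]
  by_cases hlt : h0 < q
  · have := hcase hlt
    omega
  · omega

lemma minL_spec (l : List Int) (hne : l ≠ []) : minL l ∈ l ∧ ∀ x ∈ l, minL l ≤ x := by
  have hysne : PySem.List.sorted l (fun x => x) ≠ [] := by
    rw [Ne, PySem.List.sorted_eq_nil_iff]; exact hne
  obtain ⟨h0, t, hys⟩ := List.exists_cons_of_ne_nil hysne
  have hm : minL l = h0 := by rw [minL, hys]; rfl
  constructor
  · rw [hm]
    have : h0 ∈ PySem.List.sorted l (fun x => x) := by rw [hys]; exact List.mem_cons_self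
    exact (PySem.List.mem_sorted _ _ _ _).mp this
  · rw [hm]
    exact PySem.List.key_head_sorted_le l (fun x => x) hys

-- ==== the balancing loop: full characterisation ====
lemma loopA_spec (f : Nat) : ∀ (l : List Int) (tmp cnt times : Int),
    l ≠ [] → phiQ (qv l) l < f →
    ∃ m, loopA f l tmp cnt times =
        (m, times + (if tmp ≠ minL l ∨ minL l < qv l then cnt else 0) + devQ (qv l) l)
      ∧ m ≠ [] ∧ m.headD 0 = qv l := by
  induction f with
  | zero => intro l tmp cnt times hne hf; omega
  | succ f ih =>
    intro l tmp cnt times hne hf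
    have hysne : PySem.List.sorted l (fun x => x) ≠ [] := by
      rw [Ne, PySem.List.sorted_eq_nil_iff]; exact hne
    have hperm : (PySem.List.sorted l (fun x => x)).Perm l := PySem.List.sorted_perm l _ _
    obtain ⟨h0, t, hys⟩ := List.exists_cons_of_ne_nil hysne
    have hminL : minL l = h0 := by rw [minL, hys]; rfl
    have hmin : ∀ y ∈ l, h0 ≤ y := PySem.List.key_head_sorted_le l (fun x => x) hys
    have hpair : (PySem.List.sorted l (fun x => x)).Pairwise (· ≤ ·) := by
      have := PySem.List.sorted_pairwise l (fun x => x)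
      exact this
    have hmax : ∀ y ∈ PySem.List.sorted l (fun x => x),
        y ≤ (PySem.List.sorted l (fun x => x)).getLast hysne :=
      le_getLast_of_pairwise _ hysne hpair
    have hq0 : h0 ≤ qv l := le_qv l hne h0 hmin
    have hq_mul := qv_mul_le l hne
    have hlen1 : (0:Int) < l.length := by
      have := List.length_pos_iff.mpr hne; exact_mod_cast this
    have hgd0 : PySem.List.pyGetD (PySem.List.sorted l (fun x => x)) 0 0 = h0 := by
      rw [PySem.List.pyGetD_zero, hys]; rfl
    set L := PySem.List.pyGetD (PySem.List.sorted l (fun x => x)) (-1) 0 with hLdef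
    have hmaxL : ∀ y ∈ PySem.List.sorted l (fun x => x), y ≤ L := by
      intro y hy
      rw [hLdef, PySem.List.pyGetD_neg_one _ 0 hysne]
      exact hmax y hy
    rw [loopA]
    simp only [hgd0]
    by_cases hguard : L - h0 ≥ 2
    · -- one balancing move, then recurse
      rw [if_pos hguard]
      -- t is nonempty, split off its last element
      have ht : t ≠ [] := by
        rintro rfl
        have : L = h0 := by
          rw [hLdef, hys, show [h0] = ([] : List Int) ++ [h0] from rfl,
            PySem.List.pyGetD_neg_one_append_singleton]
        omega
      obtain ⟨md, tl, hmd⟩ : ∃ md tl, t = md ++ [tl] := ⟨t.dropLast, t.getLast ht, (List.dropLast_append_getLast ht).symm⟩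
      have htl : L = tl := by
        rw [hLdef, hys, hmd, show h0 :: (md ++ [tl]) = (h0 :: md) ++ [tl] from rfl,
          PySem.List.pyGetD_neg_one_append_singleton]
      -- the mutated list
      have hset0 : PySem.List.pySetD (PySem.List.sorted l (fun x => x)) 0 (h0 + 1) =
          (h0 + 1) :: t := by
        rw [PySem.List.pySetD_of_nonneg _ _ (by omega : (0:Int) ≤ 0), hys]; rfl
      have hmv : PySem.List.pySetD (PySem.List.pySetD (PySem.List.sorted l (fun x => x)) 0 (h0 + 1)) (-1) (L - 1) =
          (h0 + 1) :: (md ++ [L - 1]) := by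
        rw [hset0, pySetD_neg_one _ _ (by simp), hmd,
          show (h0 + 1) :: (md ++ [tl]) = ((h0 + 1) :: md) ++ [tl] from rfl,
          List.dropLast_concat]
        simp
      rw [hmv]
      -- arithmetic facts about the decomposition
      have hpm : l.Perm (h0 :: (md ++ [tl])) := by
        rw [← hmd, ← hys]; exact hperm.symm
      have hqv : qv l = qv (h0 :: (md ++ [tl])) := qv_perm hpm
      have hmdmem : ∀ y ∈ md, h0 ≤ y ∧ y ≤ tl := by
        intro y hy
        constructor
        · exact hmin y (hpm.symm.subset (by simp [hy]))
        · have : y ∈ PySem.List.sorted l (fun x => x) := by rw [hys, hmd]; simp [hy]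
          have := hmaxL y this
          rw [htl] at this
          omega
      -- key bound: when the minimum is still below qv, the maximum is above it
      have hcase : h0 < qv l → qv l + 1 ≤ tl := by
        intro hlt
        by_contra hcon
        have htlq : tl ≤ qv l := by omega
        have hsum : l.sum = h0 + md.sum + tl := by
          rw [hpm.sum_eq]; simp; ring
        have hlength : (l.length : Int) = md.length + 2 := by
          rw [hpm.length_eq]; simp; ring
        have hmds : md.sum ≤ qv l * md.length :=
          sum_le_mul_length md (qv l) (fun x hx => le_trans (hmdmem x hx).2 htlq)
        rw [hlength] at hq_mul
        nlinarith
      -- the new list: same sum and length, one unit of deficit repaid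
      have hq2 : qv ((h0 + 1) :: (md ++ [L - 1])) = qv l := by
        rw [htl, hqv, qv, qv]
        have e1 : ((h0 + 1) :: (md ++ [tl - 1])).sum = (h0 :: (md ++ [tl])).sum := by
          simp; ring
        have e2 : ((h0 + 1) :: (md ++ [tl - 1])).length = (h0 :: (md ++ [tl])).length := by
          simp
        rw [e1, e2]
      have hdev : devQ (qv l) ((h0 + 1) :: (md ++ [L - 1])) =
          devQ (qv l) l - (if h0 < qv l then 1 else 0) := by
        rw [htl, devQ_perm _ hpm]
        exact move_dev (qv l) h0 tl md hq0 (by omega) hcase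
      have hphi : phiQ (qv l) ((h0 + 1) :: (md ++ [L - 1])) < phiQ (qv l) l := by
        rw [htl, phiQ_perm _ hpm]
        exact move_phi (qv l) h0 tl md hq0 (by omega) hcase
      -- minimum of the new list
      have hne' : ((h0 + 1) :: (md ++ [L - 1])) ≠ [] := by simp
      obtain ⟨hminmem, hminle⟩ := minL_spec ((h0 + 1) :: (md ++ [L - 1])) hne'
      have hminge : h0 ≤ minL ((h0 + 1) :: (md ++ [L - 1])) := by
        rcases List.mem_cons.mp hminmem with he | he
        · omega
        · rcases List.mem_append.mp he with hm | hm
          · exact (hmdmem _ hm).1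
          · simp at hm; omega
      have hminq : minL ((h0 + 1) :: (md ++ [L - 1])) ≤ qv l := by
        have := le_qv _ hne' _ hminle
        rw [hq2] at this
        exact this
      -- the payoff condition for the recursive call
      have hC' : (if h0 ≠ minL ((h0 + 1) :: (md ++ [L - 1])) ∨
            minL ((h0 + 1) :: (md ++ [L - 1])) < qv ((h0 + 1) :: (md ++ [L - 1]))
          then ((if tmp ≠ h0 then 0 else cnt) + 1) else 0) =
          if h0 < qv l then (if tmp ≠ h0 then 0 else cnt) + 1 else 0 := by
        by_cases hlt : h0 < qv l
        · rw [if_pos hlt, if_pos]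
          rcases eq_or_ne (minL ((h0 + 1) :: (md ++ [L - 1]))) h0 with he | he
          · right; rw [hq2, he]; exact hlt
          · left; exact he.symm
        · have hminq' : minL ((h0 + 1) :: (md ++ [L - 1])) = h0 := by omega
          rw [if_neg hlt, if_neg]
          rw [hq2, hminq']
          simp
          omega
      -- apply the induction hypothesis
      obtain ⟨m, hm, hmne, hmhead⟩ := ih ((h0 + 1) :: (md ++ [L - 1]))
        h0 ((if tmp ≠ h0 then 0 else cnt) + 1)
        (if tmp ≠ h0 then times + cnt else times) hne' (by rw [hq2]; omega)
      -- both branches of the tmp-test pass the same state to the recursion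
      have hstate : (if tmp ≠ h0 then h0 else tmp) = h0 := by
        by_cases htmp : tmp = h0 <;> simp [htmp]
      rw [hstate, hm]
      refine ⟨m, ?_, hmne, by rw [hmhead, hq2]⟩
      rw [hq2] at hC' ⊢
      rw [hminL, hC', hdev]
      simp only [Prod.mk.injEq, true_and]
      by_cases hlt : h0 < qv l
      · split_ifs <;> omega
      · have hdz : devQ (qv l) l = 0 :=
          devQ_eq_zero _ _ (fun x hx => by have := hmin x hx; omega)
        rw [hdz]
        split_ifs <;> omega
    · -- break: the loop ends; the minimum equals the floored average
      rw [if_neg hguard]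
      have hqh : qv l = h0 := by
        rw [qv, PySem.Int.floordiv_eq_iff_of_pos hlen1]
        constructor
        · exact mul_length_le_sum l h0 hmin
        · have hsum : l.sum = h0 + t.sum := by rw [← hperm.sum_eq, hys]; simp
          have hlength : (l.length : Int) = t.length + 1 := by
            rw [← hperm.length_eq, hys]; simp
          have hts : t.sum ≤ (h0 + 1) * t.length := by
            apply sum_le_mul_length
            intro x hx
            have hxs : x ∈ PySem.List.sorted l (fun x => x) := by rw [hys]; simp [hx]
            have := hmaxL x hxs
            omega
          rw [hsum, hlength]
          nlinarith
      have hdz : devQ (qv l) l = 0 :=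
        devQ_eq_zero _ _ (fun x hx => by have := hmin x hx; omega)
      refine ⟨PySem.List.sorted l (fun x => x), ?_, hysne, by rw [hys, hqh]; rfl⟩
      rw [hdz, hminL, hqh]
      simp only [Prod.mk.injEq, true_and]
      split_ifs <;> omega

-- ==== phase 1: the two key-collection loops build the same key list ====
lemma keys_inner_eq (ps : List Int) :
    ∀ (tA : PySem.Dict Int (List Int)) (tB : PySem.Dict Int Bool), tA.keys = tB.keys →
    (ps.foldl (fun t p => if t.contains p then t else t.insert p ([] : List Int)) tA).keys
      = (ps.foldl (fun t p => t.insert p true) tB).keys := by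
  induction ps with
  | nil => intro tA tB h; exact h
  | cons p ps ih =>
    intro tA tB h
    simp only [List.foldl_cons]
    apply ih
    by_cases hc : tA.contains p = true
    · have hcB : tB.contains p = true := by
        rw [PySem.Dict.contains_iff_mem_keys] at hc ⊢
        rw [← h]; exact hc
      rw [if_pos hc, PySem.Dict.keys_insert_of_contains _ _ hcB, h]
    · have hcB : tB.contains p = false := by
        rw [Bool.eq_false_iff, Ne, PySem.Dict.contains_iff_mem_keys, ← h,
          ← PySem.Dict.contains_iff_mem_keys]
        simpa using hc
      rw [if_neg hc,
        PySem.Dict.keys_insert_of_not_contains _ _ ((Bool.not_eq_true _).mp hc),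
        PySem.Dict.keys_insert_of_not_contains _ _ hcB, h]

lemma keys_outer_eq (is : List Int) (F : Int → PySem.Dict Int Int) :
    ∀ (tA : PySem.Dict Int (List Int)) (tB : PySem.Dict Int Bool), tA.keys = tB.keys →
    (is.foldl (fun t i => (F i).keys.foldl
        (fun t p => if t.contains p then t else t.insert p ([] : List Int)) t) tA).keys
      = (is.foldl (fun t i => (F i).keys.foldl (fun t p => t.insert p true) t) tB).keys := by
  induction is with
  | nil => intro _ _ h; exact h
  | cons i is ih =>
    intro tA tB h
    simp only [List.foldl_cons]
    exact ih _ _ (keys_inner_eq _ _ _ h)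

lemma nodup_inner (ps : List Int) :
    ∀ tA : PySem.Dict Int (List Int), tA.keys.Nodup →
    (ps.foldl (fun t p => if t.contains p then t else t.insert p ([] : List Int)) tA).keys.Nodup := by
  induction ps with
  | nil => intro _ h; exact h
  | cons p ps ih =>
    intro tA h
    simp only [List.foldl_cons]
    apply ih
    by_cases hc : tA.contains p = true
    · rw [if_pos hc]; exact h
    · rw [if_neg hc]; exact PySem.Dict.nodup_keys_insert _ _ _ h

lemma nodup_outer (is : List Int) (F : Int → PySem.Dict Int Int) :
    ∀ tA : PySem.Dict Int (List Int), tA.keys.Nodup →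
    (is.foldl (fun t i => (F i).keys.foldl
        (fun t p => if t.contains p then t else t.insert p ([] : List Int)) t) tA).keys.Nodup := by
  induction is with
  | nil => intro _ h; exact h
  | cons i is ih =>
    intro tA h
    simp only [List.foldl_cons]
    exact ih _ (nodup_inner _ _ h)

lemma nilval_inner (ps : List Int) :
    ∀ tA : PySem.Dict Int (List Int), (∀ p' : Int, tA.getD p' [] = []) →
    ∀ p', (ps.foldl (fun t p => if t.contains p then t else t.insert p ([] : List Int)) tA).getD p' [] = [] := by
  induction ps with
  | nil => intro _ h; exact h
  | cons p ps ih =>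
    intro tA h
    simp only [List.foldl_cons]
    apply ih
    intro p'
    by_cases hc : tA.contains p = true
    · rw [if_pos hc]; exact h p'
    · rw [if_neg hc, PySem.Dict.getD_insert]
      split
      · rfl
      · exact h p'

lemma nilval_outer (is : List Int) (F : Int → PySem.Dict Int Int) :
    ∀ tA : PySem.Dict Int (List Int), (∀ p' : Int, tA.getD p' [] = []) →
    ∀ p', (is.foldl (fun t i => (F i).keys.foldl
        (fun t p => if t.contains p then t else t.insert p ([] : List Int)) t) tA).getD p' [] = [] := by
  induction is with
  | nil => intro _ h; exact h
  | cons i is ih =>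
    intro tA h
    simp only [List.foldl_cons]
    exact ih _ (nilval_inner _ _ h)

-- ==== phase 2: the append loop fills each key with its exponent row ====
lemma phase2_self (isL : List Int) (g : Int → Int) (p : Int) :
    ∀ d : PySem.Dict Int (List Int),
      (isL.foldl (fun t i => t.modify p [] (· ++ [g i])) d).getD p [] = d.getD p [] ++ isL.map g := by
  induction isL with
  | nil => intro d; simp
  | cons i isL ih =>
    intro d
    simp only [List.foldl_cons, List.map_cons]
    rw [ih, PySem.Dict.getD_modify_self]
    simp

lemma phase2_other (isL : List Int) (g : Int → Int) (p p' : Int) (hne : p' ≠ p) :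
    ∀ d : PySem.Dict Int (List Int),
      (isL.foldl (fun t i => t.modify p [] (· ++ [g i])) d).getD p' [] = d.getD p' [] := by
  induction isL with
  | nil => intro d; rfl
  | cons i isL ih =>
    intro d
    simp only [List.foldl_cons]
    rw [ih, PySem.Dict.getD_modify_of_ne _ _ _ hne]

lemma phase2_keys (isL : List Int) (g : Int → Int) (p : Int) :
    ∀ d : PySem.Dict Int (List Int), p ∈ d.keys →
      (isL.foldl (fun t i => t.modify p [] (· ++ [g i])) d).keys = d.keys := by
  induction isL with
  | nil => intro d _; rfl
  | cons i isL ih =>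
    intro d hp
    simp only [List.foldl_cons]
    have hk : (d.modify p [] (· ++ [g i])).keys = d.keys := by
      rw [PySem.Dict.keys_modify,
        PySem.Dict.keys_insert_of_contains _ _ ((PySem.Dict.contains_iff_mem_keys _ _).mpr hp)]
    rw [ih _ (by rw [hk]; exact hp), hk]

lemma phase2_outer (ks : List Int) (isL : List Int) (G : Int → Int → Int) :
    ∀ d : PySem.Dict Int (List Int), ks.Nodup → (∀ p ∈ ks, p ∈ d.keys) → (∀ p ∈ ks, d.getD p [] = []) →
      (ks.foldl (fun tot p => isL.foldl (fun t i => t.modify p [] (· ++ [G p i])) tot) d).keys = d.keys ∧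
      (∀ p ∈ ks, (ks.foldl (fun tot p => isL.foldl (fun t i => t.modify p [] (· ++ [G p i])) tot) d).getD p []
          = isL.map (G p)) ∧
      (∀ p', p' ∉ ks → (ks.foldl (fun tot p => isL.foldl (fun t i => t.modify p [] (· ++ [G p i])) tot) d).getD p' []
          = d.getD p' []) := by
  induction ks with
  | nil => intro d _ _ _; exact ⟨rfl, by simp, fun _ _ => rfl⟩
  | cons k ks ih =>
    intro d hnd hmem hnil
    obtain ⟨hnd1, hnd2⟩ := List.nodup_cons.mp hnd
    simp only [List.foldl_cons]
    have hk1 : (isL.foldl (fun t i => t.modify k [] (· ++ [G k i])) d).keys = d.keys :=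
      phase2_keys isL (G k) k d (hmem k (by simp))
    have hself : (isL.foldl (fun t i => t.modify k [] (· ++ [G k i])) d).getD k [] = isL.map (G k) := by
      rw [phase2_self, hnil k (by simp)]; simp
    have hoth : ∀ p', p' ≠ k →
        (isL.foldl (fun t i => t.modify k [] (· ++ [G k i])) d).getD p' [] = d.getD p' [] :=
      fun p' h => phase2_other isL (G k) k p' h d
    obtain ⟨ihk, ihv, iho⟩ := ih (isL.foldl (fun t i => t.modify k [] (· ++ [G k i])) d) hnd2
      (fun p hp => by rw [hk1]; exact hmem p (by simp [hp]))
      (fun p hp => by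
        rw [hoth p (fun he => hnd1 (he ▸ hp))]
        exact hnil p (by simp [hp]))
    refine ⟨by rw [ihk, hk1], ?_, ?_⟩
    · intro p hp
      rcases List.mem_cons.mp hp with rfl | hp'
      · rw [iho p hnd1, hself]
      · exact ihv p hp'
    · intro p' hp'
      have h1 : p' ∉ ks := fun h => hp' (by simp [h])
      have h2 : p' ≠ k := fun h => hp' (by simp [h])
      rw [iho p' h1, hoth p' h2]

lemma pyGetD_zero_headD (m : List Int) (hm : m ≠ []) : PySem.List.pyGetD m 0 0 = m.headD 0 := by
  rw [PySem.List.pyGetD_zero]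
  cases m with
  | nil => rfl
  | cons x t => rfl

-- ==== phase 3: the per-prime balancing pass ====
lemma phase3 (ks : List Int) :
    ∀ (T : PySem.Dict Int (List Int)) (times : Int), ks.Nodup → (∀ p ∈ ks, p ∈ T.keys) →
      (∀ p ∈ ks, T.getD p [] ≠ []) →
      (ks.foldl (fun (s : PySem.Dict Int (List Int) × Int) p =>
          (s.1.insert p (loopA (fuelA (s.1.getD p [])) (s.1.getD p [])
              ((PySem.List.min? (s.1.getD p []) (fun x => x)).getD 0) 0 s.2).1,
           (loopA (fuelA (s.1.getD p [])) (s.1.getD p [])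
              ((PySem.List.min? (s.1.getD p []) (fun x => x)).getD 0) 0 s.2).2)) (T, times)).1.keys
        = T.keys ∧
      (ks.foldl (fun (s : PySem.Dict Int (List Int) × Int) p =>
          (s.1.insert p (loopA (fuelA (s.1.getD p [])) (s.1.getD p [])
              ((PySem.List.min? (s.1.getD p []) (fun x => x)).getD 0) 0 s.2).1,
           (loopA (fuelA (s.1.getD p [])) (s.1.getD p [])
              ((PySem.List.min? (s.1.getD p []) (fun x => x)).getD 0) 0 s.2).2)) (T, times)).2
        = times + (ks.map (fun p => devQ (qv (T.getD p [])) (T.getD p []))).sum ∧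
      (∀ p ∈ ks, PySem.List.pyGetD
          ((ks.foldl (fun (s : PySem.Dict Int (List Int) × Int) p =>
            (s.1.insert p (loopA (fuelA (s.1.getD p [])) (s.1.getD p [])
                ((PySem.List.min? (s.1.getD p []) (fun x => x)).getD 0) 0 s.2).1,
             (loopA (fuelA (s.1.getD p [])) (s.1.getD p [])
                ((PySem.List.min? (s.1.getD p []) (fun x => x)).getD 0) 0 s.2).2)) (T, times)).1.getD p []) 0 0
          = qv (T.getD p [])) := by
  induction ks with
  | nil => intro T times _ _ _; exact ⟨rfl, by simp, by simp⟩
  | cons k ks ih =>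
    intro T times hnd hmem hne
    obtain ⟨hk1, hk2⟩ := List.nodup_cons.mp hnd
    have hlne : T.getD k [] ≠ [] := hne k (by simp)
    obtain ⟨m, heq, hmne, hmh⟩ := loopA_spec (fuelA (T.getD k [])) (T.getD k [])
      ((PySem.List.min? (T.getD k []) (fun x => x)).getD 0) 0 times hlne (loopA_fuel _ hlne)
    simp only [List.foldl_cons, heq, ite_self, add_zero]
    have hTk : (T.insert k m).keys = T.keys :=
      PySem.Dict.keys_insert_of_contains _ _
        ((PySem.Dict.contains_iff_mem_keys _ _).mpr (hmem k (by simp)))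
    have hTv : ∀ p ∈ ks, (T.insert k m).getD p [] = T.getD p [] := by
      intro p hp
      exact PySem.Dict.getD_insert_of_ne _ _ _ (fun he => hk1 (he ▸ hp))
    obtain ⟨ih1, ih2, ih3⟩ := ih (T.insert k m) (times + devQ (qv (T.getD k [])) (T.getD k []))
      hk2 (fun p hp => by rw [hTk]; exact hmem p (by simp [hp]))
      (fun p hp => by rw [hTv p hp]; exact hne p (by simp [hp]))
    refine ⟨by rw [ih1, hTk], ?_, ?_⟩
    · rw [ih2, List.map_cons, List.sum_cons,
        List.map_congr_left (fun p hp => by rw [hTv p hp])]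
      ring
    · intro p hp
      rcases List.mem_cons.mp hp with rfl | hp'
      · -- p = k : the rest of the fold leaves key k untouched
        have huntouched : ∀ (ks' : List Int), p ∉ ks' → ∀ (s : PySem.Dict Int (List Int) × Int),
            (ks'.foldl (fun (s : PySem.Dict Int (List Int) × Int) p =>
              (s.1.insert p (loopA (fuelA (s.1.getD p [])) (s.1.getD p [])
                  ((PySem.List.min? (s.1.getD p []) (fun x => x)).getD 0) 0 s.2).1,
               (loopA (fuelA (s.1.getD p [])) (s.1.getD p [])
                  ((PySem.List.min? (s.1.getD p []) (fun x => x)).getD 0) 0 s.2).2)) s).1.getD p []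
              = s.1.getD p [] := by
          intro ks'
          induction ks' with
          | nil => intro _ _; rfl
          | cons k' ks' ih' =>
            intro hnk s
            simp only [List.foldl_cons]
            rw [ih' (fun h => hnk (by simp [h]))]
            exact PySem.Dict.getD_insert_of_ne _ _ _ (fun he => hnk (by simp [he]))
        rw [huntouched ks hk1, PySem.Dict.getD_insert_self, pyGetD_zero_headD m hmne, hmh]
      · rw [ih3 p hp', hTv p hp']

lemma foldl_mul_prod (ks : List Int) (f : Int → Int) :
    ∀ acc, ks.foldl (fun a p => a * f p) acc = acc * (ks.map f).prod := by
  induction ks with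
  | nil => intro acc; simp
  | cons k ks ih =>
    intro acc
    simp only [List.foldl_cons, List.map_cons, List.prod_cons]
    rw [ih]
    ring

-- ==== assembly ====
lemma solve_eq_alt (n : Int) (a : List Int) : solve n a = solve_alt n a := by
  by_cases hn : n ≤ 0
  · simp [solve, solve_alt, PySem.List.pyRange_one_eq_nil hn]
  · have hn0 : (0:Int) ≤ n := by omega
    simp only [solve, solve_alt]
    rw [PySem.List.foldl_prod_mk
        (f := fun (pf : List (PySem.Dict Int Int)) i => pf ++ [pyFactorization (PySem.List.pyGetD a i 0)])
        (g := fun (tot : PySem.Dict Int (List Int)) i =>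
          List.foldl (fun t p => if t.contains p = true then t else t.insert p ([] : List Int)) tot
            (pyFactorization (PySem.List.pyGetD a i 0)).keys)]
    simp only [PySem.List.foldl_append_singleton_eq_map, List.nil_append, List.foldl_map]
    set facts := List.map (fun x => pyFactorization (PySem.List.pyGetD a x 0)) (PySem.List.pyRange 0 n) with hfacts
    set tot0 := List.foldl (fun tot i =>
        List.foldl (fun t p => if t.contains p = true then t else t.insert p ([] : List Int)) tot
          (pyFactorization (PySem.List.pyGetD a i 0)).keys) PySem.Dict.empty (PySem.List.pyRange 0 n) with htot0
    set prB := List.foldl (fun tot i =>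
        List.foldl (fun t p => t.insert p true) tot
          (pyFactorization (PySem.List.pyGetD a i 0)).keys)
        (PySem.Dict.empty : PySem.Dict Int Bool) (PySem.List.pyRange 0 n) with hprB
    set tot1 := List.foldl (fun tot p =>
        List.foldl (fun t i => t.modify p [] fun x =>
            x ++ [(PySem.List.pyGetD facts i PySem.Dict.empty).getD p 0]) tot
          (PySem.List.pyRange 0 n)) tot0 tot0.keys with htot1
    -- the two key tables agree
    have hkeys := keys_outer_eq (PySem.List.pyRange 0 n)
      (fun i => pyFactorization (PySem.List.pyGetD a i 0)) PySem.Dict.empty PySem.Dict.empty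
      (by rw [PySem.Dict.keys_empty, PySem.Dict.keys_empty])
    rw [← htot0, ← hprB] at hkeys
    have hnd : tot0.keys.Nodup := by
      rw [htot0]
      exact nodup_outer _ _ _ (by rw [PySem.Dict.keys_empty]; exact List.nodup_nil)
    have hnil : ∀ p' : Int, tot0.getD p' [] = [] := by
      rw [htot0]
      exact nilval_outer _ _ _ (fun p' => PySem.Dict.getD_empty _ _)
    have hflen : ((facts.length : Int)) = n := by
      rw [hfacts, List.length_map, PySem.List.length_pyRange_one]
      omega
    have hexps : ∀ p : Int, (PySem.List.pyRange 0 n).map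
        (fun i => (PySem.List.pyGetD facts i PySem.Dict.empty).getD p 0)
          = facts.map (fun f => f.getD p 0) := by
      intro p
      conv_lhs => rw [← hflen]
      rw [show (fun i => (PySem.List.pyGetD facts i PySem.Dict.empty).getD p 0)
          = (fun f : PySem.Dict Int Int => f.getD p 0) ∘ (fun i => PySem.List.pyGetD facts i PySem.Dict.empty) from rfl,
        ← List.map_map, PySem.List.map_pyGetD_pyRange_zero']
    obtain ⟨hP2k, hP2v, hP2o⟩ := phase2_outer tot0.keys (PySem.List.pyRange 0 n)
      (fun p i => (PySem.List.pyGetD facts i PySem.Dict.empty).getD p 0) tot0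
      hnd (fun p hp => hp) (fun p _ => hnil p)
    rw [← htot1] at hP2k hP2v
    rw [hP2k]
    have hq_eq : ∀ p : Int, qv (facts.map (fun f => f.getD p 0))
        = PySem.Int.floordiv (facts.map (fun f => f.getD p 0)).sum n := by
      intro p
      rw [qv, List.length_map, hflen]
    have hval : ∀ p ∈ tot0.keys, tot1.getD p [] = facts.map (fun f => f.getD p 0) := by
      intro p hp
      rw [hP2v p hp, hexps p]
    have hnonnil : ∀ p ∈ tot0.keys, tot1.getD p [] ≠ [] := by
      intro p hp
      rw [hP2v p hp]
      simp only [ne_eq, List.map_eq_nil_iff]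
      apply List.ne_nil_of_length_pos
      rw [PySem.List.length_pyRange_one]
      omega
    obtain ⟨hP3k, hP3t, hP3v⟩ := phase3 tot0.keys tot1 0 hnd
      (fun p hp => by rw [hP2k]; exact hp) hnonnil
    rw [hP3t, hP3k, hP2k, zero_add]
    set r3 := List.foldl (fun (s : PySem.Dict Int (List Int) × Int) p =>
        (s.1.insert p (loopA (fuelA (s.1.getD p [])) (s.1.getD p [])
            ((PySem.List.min? (s.1.getD p []) (fun x => x)).getD 0) 0 s.2).1,
         (loopA (fuelA (s.1.getD p [])) (s.1.getD p [])
            ((PySem.List.min? (s.1.getD p []) (fun x => x)).getD 0) 0 s.2).2)) (tot1, 0) tot0.keys with hr3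
    rw [PySem.List.foldl_congr_mem tot0.keys
      (fun (ans : Int) p => ans * p ^ (PySem.List.pyGetD (r3.1.getD p []) 0 0).toNat)
      (fun (ans : Int) p => ans * p ^ (qv (tot1.getD p [])).toNat) 1
      (fun acc p hp => by simp only [hP3v p hp])]
    rw [foldl_mul_prod, one_mul]
    -- the B-side fold, split into its two components
    rw [PySem.List.foldl_prod_mk
      (f := fun (acc : Int) p => acc * p ^ (PySem.Int.floordiv (List.map (fun f => f.getD p 0) facts).sum n).toNat)
      (g := fun (acc : Int) p => acc + (List.map (fun e => PySem.Int.floordiv (List.map (fun f => f.getD p 0) facts).sum n - e)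
        (List.filter (fun e => decide (e < PySem.Int.floordiv (List.map (fun f => f.getD p 0) facts).sum n))
          (List.map (fun f => f.getD p 0) facts))).sum)]
    rw [← hkeys, foldl_mul_prod, one_mul, PySem.List.foldl_add, zero_add]
    refine Prod.ext ?_ ?_
    · simp only
      congr 1
      apply List.map_congr_left
      intro p hp
      rw [hval p hp, hq_eq p]
    · simp only
      congr 1
      apply List.map_congr_left
      intro p hp
      rw [hval p hp, ← hq_eq p, filter_sum_eq_devQ]

-- ===== VERDICT (by name: the statement is the Claim_ definition above) =====
theorem solve_spec : Claim_equal_solve := by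
  intro n a _ _
  unfold Spec_solve
  exact solve_eq_alt n a
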